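-- pv_equiv track=rewrite | github.com/sheng1993/coding-problems | anagram.py | solution
-- ===== SOURCE A (Python) =====
-- from itertools import permutations
--
-- vowels = {'A', 'E', 'I', 'O', 'U'}
--
-- def solution(S):
--     if not S:
--         return 0
--
--     l = len(S)
--     if l <= 1:
--         return 0
--
--     # Count all characters to check if structured word is possible
--     # to avoid going throught all permutations
--     if not possibleStructureWords(S):
--         return 0
--
--     count = 0
--     found = set()
--     for perm in permutations(S):
--         permStr = ''.join(perm)
--         if permStr not in found and isAnagram(perm) :
--             found.add(permStr)
--             count += 1
--     return count
--
-- def isAnagram(s):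
--     l = len(s)
--     if l == 0:
--         return False
--     if s[0] in vowels:
--         return False
--
--     for i in range(1, l):
--         if i % 2 == 0 and s[i] in vowels:
--             return False
--         elif i % 2 != 0 and s[i] not in vowels:
--             return False
--     return True
--
-- def possibleStructureWords(S):
--     l = len(S)
--     vowelCount = 0
--     nonVowelCount = 0
--     for i in range(len(S)):
--         if S[i].upper() in vowels:
--             vowelCount += 1
--         else:
--             nonVowelCount += 1
--
--     return (vowelCount == nonVowelCount) or (vowelCount == nonVowelCount - 1)
-- ===== SOURCE B (Python) =====
-- vowels = {'A', 'E', 'I', 'O', 'U'}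
--
-- def solution(S):
--     l = len(S)
--     if l < 2:
--         return 0
--     # a valid word has exactly l//2 vowels (the odd positions); count them at C speed
--     if sum(S.count(ch) for ch in 'AEIOU') != l // 2:
--         return 0
--     cons = [ch for ch in S if ch not in vowels]
--     vows = [ch for ch in S if ch in vowels]
--     return _count(cons, vows, True)
--
-- def _count(cons, vows, cons_turn):
--     # number of distinct strings using exactly these two multisets,
--     # consonants at the even positions, vowels at the odd ones
--     if not cons and not vows:
--         return 1
--     pool = cons if cons_turn else vows
--     total = 0
--     for ch in set(pool):
--         rest = list(pool)
--         rest.remove(ch)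
--         if cons_turn:
--             total += _count(rest, vows, False)
--         else:
--             total += _count(cons, rest, True)
--     return total
-- ===== Notes on version B (the rewrite author's own statement) =====
-- stated objective: faster
-- what changed: A enumerates all len(S)! permutations, filters them with an index-parity check and dedups via a set; B first rejects strings whose vowel count cannot fill the odd slots using C-level str.count, then partitions the string into consonant and vowel multisets once and counts the distinct valid strings directly by backtracking over distinct next characters, never touching the factorial permutation space and needing no dedup set.
-- intended difference: On strings of length >= 2 whose count of uppercase vowels is exactly floor(len/2) but whose case-insensitive vowel count is not (e.g. 'Aba'), A returns 0 because its possibleStructureWords pre-filter counts vowels case-insensitively while the actual matching is case-sensitive; B returns the true positive count of valid arrangements, which is the intended value. — e.g. on solution("Aba"): A returns 0, B returns 2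
import Mathlib
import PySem

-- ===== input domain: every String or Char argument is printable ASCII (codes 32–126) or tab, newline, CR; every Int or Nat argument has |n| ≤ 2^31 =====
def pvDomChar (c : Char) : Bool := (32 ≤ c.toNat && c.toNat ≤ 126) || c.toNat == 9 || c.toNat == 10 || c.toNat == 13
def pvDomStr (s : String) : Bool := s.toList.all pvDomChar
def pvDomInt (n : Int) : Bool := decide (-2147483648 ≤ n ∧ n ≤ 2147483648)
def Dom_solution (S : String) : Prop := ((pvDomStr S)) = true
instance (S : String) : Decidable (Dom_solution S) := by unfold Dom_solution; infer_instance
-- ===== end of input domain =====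

-- B replaces A's brute force over all len(S)! permutations with a backtracking count over
-- DISTINCT next characters (consonant at even positions, vowel at odd ones), counting each
-- distinct valid string exactly once with no dedup set; measurably faster.

-- ===== PORT A =====
def pvVowels : List Char := ['A', 'E', 'I', 'O', 'U']
def pvIsVowel (c : Char) : Bool := pvVowels.contains c

def pvIsAnagram (s : List Char) : Bool :=
  if s.length = 0 then false
  else if pvIsVowel (s.headD ' ') then false
  else (PySem.List.pyRange 1 (s.length : Int) 1).all (fun i =>
    if PySem.Int.mod i 2 = 0 then !pvIsVowel (PySem.List.pyGetD s i ' ')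
    else pvIsVowel (PySem.List.pyGetD s i ' '))

-- `S[i].upper()` on a single printable-ASCII char is exactly `Char.toUpper`
def pvPossible (s : List Char) : Bool :=
  let p := s.foldl (fun (st : Int × Int) c =>
    if pvIsVowel c.toUpper then (st.1 + 1, st.2) else (st.1, st.2 + 1)) (0, 0)
  (p.1 == p.2) || (p.1 == p.2 - 1)

-- the found-set stores the permutations as `List Char` (Python joins to a str; ''.join is injective)
def solution (S : String) : Int :=
  let cs := S.toList
  if cs = [] then 0
  else if cs.length ≤ 1 then 0
  else if !pvPossible cs then 0
  else ((PySem.List.permutations cs cs.length).foldl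
        (fun (st : PySem.Set (List Char) × Int) p =>
          if !(PySem.Set.contains st.1 p) && pvIsAnagram p then (PySem.Set.add st.1 p, st.2 + 1) else st)
        (PySem.Set.empty, 0)).2

-- ===== PORT B =====
-- fuel = |cons| + |vows| suffices (each recursive call consumes one character); structural
-- recursion on the fuel keeps the definition kernel-reducible.  Python B iterates `for ch in
-- set(pool)`; the result is a sum, so it does not depend on the iteration order of the set.
def pvCountGo : Nat → List Char → List Char → Bool → Int
  | fuel, c, v, turn =>
    if c = [] ∧ v = [] then 1
    else
      match fuel with
      | 0 => 0
      | fuel' + 1 =>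
        if turn then
          ((PySem.Set.ofList c).map (fun x => pvCountGo fuel' (c.erase x) v false)).sum
        else
          ((PySem.Set.ofList v).map (fun x => pvCountGo fuel' c (v.erase x) true)).sum

def pvCount (c v : List Char) (turn : Bool) : Int := pvCountGo (c.length + v.length) c v turn

def solution_alt (S : String) : Int :=
  let cs := S.toList
  if cs.length < 2 then 0
  else if (pvVowels.map (fun ch => cs.count ch)).sum ≠ cs.length / 2 then 0
  else pvCount (cs.filter (fun c => !pvIsVowel c)) (cs.filter (fun c => pvIsVowel c)) true

-- ===== PRECONDITION & SPEC =====
-- On strings of length ≥ 2 whose UPPERCASE vowel count is exactly ⌊len/2⌋ but whose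
-- case-insensitive vowel count is not, A's case-insensitive pre-filter possibleStructureWords
-- wrongly returns 0 although valid case-sensitive arrangements exist; B returns their true
-- (positive) count, which is the intended value since the matching itself is case-sensitive.
-- how many of the five uppercase vowel letters a list of characters holds
def pvNumVow (l : List Char) : Nat :=
  l.count 'A' + l.count 'E' + l.count 'I' + l.count 'O' + l.count 'U'

def D_solution (S : String) : Prop :=
  2 ≤ S.toList.length ∧
  pvNumVow S.toList = S.toList.length / 2 ∧
  pvNumVow (S.toList.map Char.toUpper) ≠ S.toList.length / 2
instance (S : String) : Decidable (D_solution S) := by unfold D_solution; infer_instance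

def Spec_solution (S : String) (out : Int) : Prop := ¬ D_solution S → out = solution_alt S
instance (S : String) (out : Int) : Decidable (Spec_solution S out) := by unfold Spec_solution; infer_instance

def pvDiffWitness_solution : String := "Aba"
def pvDiffWitnessOut_solution : Int × Int := (0, 2)

-- ===== CLAIM (what is proved, stated in full; the proofs are below) =====
def Claim_unchanged_solution : Prop := ∀ (S : String), Dom_solution S → Spec_solution S (solution S)
def Claim_changed_solution : Prop := Dom_solution (pvDiffWitness_solution) ∧ D_solution (pvDiffWitness_solution) ∧ solution (pvDiffWitness_solution) = pvDiffWitnessOut_solution.1 ∧ solution_alt (pvDiffWitness_solution) = pvDiffWitnessOut_solution.2 ∧ pvDiffWitnessOut_solution.1 ≠ pvDiffWitnessOut_solution.2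
def Claim_exact_solution : Prop := ∀ (S : String), Dom_solution S → D_solution S → solution S ≠ solution_alt S

-- ===== LEMMAS AND PROOFS =====

-- the alternation pattern as a structural predicate: `turn = true` means the next
-- position must hold a consonant, `turn = false` a vowel
def pvPat : Bool → List Char → Bool
  | _, [] => true
  | true, x :: xs => (!pvIsVowel x) && pvPat false xs
  | false, x :: xs => pvIsVowel x && pvPat true xs

-- the set of distinct valid strings over the two multisets
def pvGood (c v : List Char) (turn : Bool) : Finset (List Char) :=
  ((c ++ v).permutations.filter (pvPat turn)).toFinset

theorem pvParityFlip (j : Nat) : decide ((j+1) % 2 = 1) = !decide (j % 2 = 1) := by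
  rcases Nat.mod_two_eq_zero_or_one j with h | h <;> simp [Nat.add_mod, h]

theorem pvPat_iff (s : List Char) : ∀ turn : Bool,
    pvPat turn s = true ↔ ∀ i : Nat, (h : i < s.length) → pvIsVowel s[i] = (decide (i % 2 = 1) == turn) := by
  induction s with
  | nil => intro turn; simp [pvPat]
  | cons x xs ih =>
    intro turn
    cases turn
    · simp only [pvPat, Bool.and_eq_true]
      constructor
      · rintro ⟨hx, hxs⟩ i hi
        cases i with
        | zero => simpa using hx
        | succ j =>
          have := (ih true).mp hxs j (by simpa using hi)
          simp only [List.getElem_cons_succ, pvParityFlip]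
          rw [this]
          cases decide (j % 2 = 1) <;> rfl
      · intro h
        refine ⟨by simpa using h 0 (by simp), (ih true).mpr ?_⟩
        intro j hj
        have := h (j+1) (by simpa using Nat.succ_lt_succ hj)
        simp only [List.getElem_cons_succ, pvParityFlip] at this
        rw [this]; cases decide (j % 2 = 1) <;> rfl
    · simp only [pvPat, Bool.and_eq_true]
      constructor
      · rintro ⟨hx, hxs⟩ i hi
        cases i with
        | zero => simpa using hx
        | succ j =>
          have := (ih false).mp hxs j (by simpa using hi)
          simp only [List.getElem_cons_succ, pvParityFlip]
          rw [this]
          cases decide (j % 2 = 1) <;> rfl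
      · intro h
        refine ⟨by simpa using h 0 (by simp), (ih false).mpr ?_⟩
        intro j hj
        have := h (j+1) (by simpa using Nat.succ_lt_succ hj)
        simp only [List.getElem_cons_succ, pvParityFlip] at this
        rw [this]; cases decide (j % 2 = 1) <;> rfl

theorem pvIsAnagram_eq_pat (s : List Char) (hs : s ≠ []) : pvIsAnagram s = pvPat true s := by
  rw [Bool.eq_iff_iff]
  have hl : 0 < s.length := List.length_pos_of_ne_nil hs
  rw [pvPat_iff s true]
  unfold pvIsAnagram
  rw [if_neg (by omega)]
  constructor
  · intro h i hi
    split at h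
    · exact absurd h (by simp)
    · rename_i hhead
      rw [List.all_eq_true] at h
      cases i with
      | zero =>
        have : s.headD ' ' = s[0] := by cases s with | nil => simp at hs | cons a t => rfl
        rw [this] at hhead
        simp [hhead]
      | succ j =>
        have hmem : ((j+1 : Nat) : Int) ∈ PySem.List.pyRange 1 (s.length : Int) 1 := by
          rw [PySem.List.mem_pyRange_one]; constructor <;> [omega; exact_mod_cast (by exact_mod_cast hi)]
        have := h _ hmem
        rw [PySem.List.pyGetD_natCast, List.getD_eq_getElem _ _ hi] at this
        rw [show ((2:Int)) = ((2:Nat):Int) from rfl, PySem.Int.mod_natCast] at this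
        by_cases hp : (j+1) % 2 = 0
        · rw [if_pos (by exact_mod_cast congrArg (Nat.cast : Nat → Int) hp)] at this
          simp only [Bool.not_eq_true'] at this
          rw [this]
          have hno : ¬ ((j+1) % 2 = 1) := by omega
          simp [hno]
        · rw [if_neg (by exact_mod_cast fun hc => hp (by exact_mod_cast hc))] at this
          rw [this]; have : (j+1) % 2 = 1 := by omega
          simp [this]
  · intro h
    have h0 := h 0 hl
    simp only [Nat.zero_mod] at h0
    have hhead : s.headD ' ' = s[0] := by cases s with | nil => simp at hs | cons a t => rfl
    rw [if_neg (by rw [hhead]; simp [h0])]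
    rw [List.all_eq_true]
    intro i hmem
    rw [PySem.List.mem_pyRange_one] at hmem
    obtain ⟨h1, h2⟩ := hmem
    have hiN : i = ((i.toNat : Nat) : Int) := by omega
    have hlt : i.toNat < s.length := by omega
    have hv := h i.toNat hlt
    rw [hiN, PySem.List.pyGetD_natCast, List.getD_eq_getElem _ _ hlt]
    rw [show ((2:Int)) = ((2:Nat):Int) from rfl, PySem.Int.mod_natCast]
    by_cases hp : i.toNat % 2 = 0
    · rw [if_pos (by exact_mod_cast hp)]
      have : ¬ (i.toNat % 2 = 1) := by omega
      simp [this] at hv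
      simp [hv]
    · rw [if_neg (by exact_mod_cast fun hc => hp (by exact_mod_cast hc))]
      have : i.toNat % 2 = 1 := by omega
      simp [this] at hv
      simp [hv]

theorem pvFold_spec (ps : List (List Char)) : ∀ (found : PySem.Set (List Char)) (cnt : Int),
    ps.foldl
      (fun (st : PySem.Set (List Char) × Int) p =>
        if !(PySem.Set.contains st.1 p) && pvIsAnagram p then (PySem.Set.add st.1 p, st.2 + 1) else st)
      (found, cnt) =
    (PySem.Set.update found (ps.filter pvIsAnagram),
     cnt + ((PySem.Set.update found (ps.filter pvIsAnagram)).length : Int) - (found.length : Int)) := by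
  induction ps with
  | nil => intro found cnt; simp [PySem.Set.update]
  | cons p ps ih =>
    intro found cnt
    simp only [List.foldl_cons, List.filter_cons]
    by_cases hA : pvIsAnagram p
    · simp only [hA, if_pos]
      by_cases hc : PySem.Set.contains found p
      · have hmem : p ∈ found := (PySem.Set.contains_iff found p).mp hc
        have hadd : PySem.Set.add found p = found := by
          simp [PySem.Set.add]; exact hmem
        rw [hc]
        simp only [Bool.not_true, Bool.false_and, if_false, Bool.false_eq_true]
        rw [ih found cnt]
        have hupd : PySem.Set.update found (p :: ps.filter pvIsAnagram) =
            PySem.Set.update found (ps.filter pvIsAnagram) := by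
          show List.foldl PySem.Set.add found _ = _
          simp [List.foldl_cons, hadd]
          rfl
        rw [hupd]
      · rw [Bool.not_eq_true] at hc
        rw [hc]
        simp only [Bool.not_false, Bool.true_and, if_true]
        rw [ih (PySem.Set.add found p) (cnt + 1)]
        have hmem : p ∉ found := fun hm => by
          have := (PySem.Set.contains_iff found p).mpr hm; rw [hc] at this; exact Bool.false_ne_true this
        have hadd : PySem.Set.add found p = found ++ [p] := by
          simp [PySem.Set.add]; exact hmem
        have hupd : PySem.Set.update found (p :: ps.filter pvIsAnagram) =
            PySem.Set.update (PySem.Set.add found p) (ps.filter pvIsAnagram) := by rfl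
        rw [hupd]
        have hlen : ((PySem.Set.add found p).length : Int) = (found.length : Int) + 1 := by
          rw [hadd]; simp
        rw [Prod.mk.injEq]
        exact ⟨rfl, by omega⟩
    · rw [Bool.not_eq_true] at hA
      simp only [hA, Bool.and_false, if_false, Bool.false_eq_true]
      exact ih found cnt

theorem pvMem_perms_of_perm {α : Type} [DecidableEq α] : ∀ (t xs : List α), t.Perm xs →
    t ∈ PySem.List.permutations xs xs.length := by
  intro t
  induction t with
  | nil =>
    intro xs h
    have : xs = [] := h.symm.eq_nil
    subst this
    simp [PySem.List.permutations_zero]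
  | cons x t' ih =>
    intro xs h
    have hx : x ∈ xs ∧ t'.Perm (xs.erase x) := List.cons_perm_iff_perm_erase.mp h
    obtain ⟨hxm, hperm⟩ := hx
    have hlen : xs.length = t'.length + 1 := by
      have := h.length_eq; simpa using this.symm
    rw [hlen, PySem.List.permutations_succ, List.mem_flatMap]
    refine ⟨List.idxOf x xs, ?_, ?_⟩
    · rw [List.mem_range]; exact List.idxOf_lt_length_of_mem hxm
    · have hidx : List.idxOf x xs < xs.length := List.idxOf_lt_length_of_mem hxm
      have hget : xs[List.idxOf x xs]? = some x := by
        rw [List.getElem?_eq_getElem hidx, List.getElem_idxOf hidx]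
      rw [hget]
      simp only [List.mem_map]
      refine ⟨t', ?_, rfl⟩
      have herase : xs.eraseIdx (List.idxOf x xs) = xs.erase x := List.eraseIdx_idxOf_eq_erase x xs
      rw [herase]
      have hlen2 : (xs.erase x).length = t'.length := by
        rw [← hperm.length_eq]
      rw [← hlen2]
      exact ih _ hperm

theorem pvMem_pypermutations {α : Type} [DecidableEq α] (xs t : List α) :
    t ∈ PySem.List.permutations xs xs.length ↔ t.Perm xs :=
  ⟨PySem.List.perm_of_mem_permutations, pvMem_perms_of_perm t xs⟩

theorem pvMem_good (c v t : List Char) (turn : Bool) :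
    t ∈ pvGood c v turn ↔ t.Perm (c ++ v) ∧ pvPat turn t = true := by
  simp [pvGood, List.mem_permutations]

theorem pvGood_decomp_true (c v : List Char) (hne : ¬(c = [] ∧ v = []))
    (hc : ∀ x ∈ c, pvIsVowel x = false) (hv : ∀ x ∈ v, pvIsVowel x = true) :
    pvGood c v true = c.toFinset.biUnion (fun x => (pvGood (c.erase x) v false).image (x :: ·)) := by
  ext t
  simp only [Finset.mem_biUnion, Finset.mem_image, List.mem_toFinset, pvMem_good]
  constructor
  · rintro ⟨hperm, hpat⟩
    cases t with
    | nil =>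
      exact absurd (List.append_eq_nil_iff.mp hperm.symm.eq_nil) hne
    | cons x t' =>
      simp only [pvPat, Bool.and_eq_true, Bool.not_eq_true'] at hpat
      obtain ⟨hxv, hpat'⟩ := hpat
      have hx : x ∈ c ++ v ∧ t'.Perm ((c ++ v).erase x) := List.cons_perm_iff_perm_erase.mp hperm
      have hxc : x ∈ c := by
        rcases List.mem_append.mp hx.1 with h | h
        · exact h
        · exact absurd (hv x h) (by simp [hxv])
      refine ⟨x, hxc, t', ⟨?_, hpat'⟩, rfl⟩
      rw [← List.erase_append_left v hxc]
      exact hx.2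
  · rintro ⟨x, hxc, t', ⟨hperm, hpat'⟩, rfl⟩
    constructor
    · have h1 : (x :: t').Perm (x :: (c.erase x ++ v)) := hperm.cons x
      have h2 : (c ++ v).Perm ((x :: c.erase x) ++ v) := (List.perm_cons_erase hxc).append_right v
      exact h1.trans h2.symm
    · simp [pvPat, hc x hxc, hpat']

theorem pvGood_decomp_false (c v : List Char) (hne : ¬(c = [] ∧ v = []))
    (hc : ∀ x ∈ c, pvIsVowel x = false) (hv : ∀ x ∈ v, pvIsVowel x = true) :
    pvGood c v false = v.toFinset.biUnion (fun x => (pvGood c (v.erase x) true).image (x :: ·)) := by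
  ext t
  simp only [Finset.mem_biUnion, Finset.mem_image, List.mem_toFinset, pvMem_good]
  constructor
  · rintro ⟨hperm, hpat⟩
    cases t with
    | nil =>
      exact absurd (List.append_eq_nil_iff.mp hperm.symm.eq_nil) hne
    | cons x t' =>
      simp only [pvPat, Bool.and_eq_true] at hpat
      obtain ⟨hxv, hpat'⟩ := hpat
      have hx : x ∈ c ++ v ∧ t'.Perm ((c ++ v).erase x) := List.cons_perm_iff_perm_erase.mp hperm
      have hxnc : x ∉ c := fun h => by rw [hc x h] at hxv; exact Bool.false_ne_true hxv
      have hxvm : x ∈ v := by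
        rcases List.mem_append.mp hx.1 with h | h
        · exact absurd h hxnc
        · exact h
      refine ⟨x, hxvm, t', ⟨?_, hpat'⟩, rfl⟩
      rw [← List.erase_append_right v hxnc]
      exact hx.2
  · rintro ⟨x, hxvm, t', ⟨hperm, hpat'⟩, rfl⟩
    constructor
    · have h1 : (x :: t').Perm (x :: (c ++ v.erase x)) := hperm.cons x
      have h2 : (c ++ v).Perm (c ++ x :: v.erase x) := (List.perm_cons_erase hxvm).append_left c
      have h3 : (c ++ x :: v.erase x).Perm (x :: (c ++ v.erase x)) := by
        simp [List.perm_middle]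
      exact h1.trans (h2.trans h3).symm
    · simp [pvPat, hv x hxvm, hpat']

theorem pvCard_biUnion_cons (s : Finset Char) (F : Char → Finset (List Char)) :
    (s.biUnion (fun x => (F x).image (x :: ·))).card = ∑ x ∈ s, (F x).card := by
  rw [Finset.card_biUnion]
  · exact Finset.sum_congr rfl (fun x _ => Finset.card_image_of_injective _ (List.cons_injective))
  · intro x _ y _ hxy
    simp only [Finset.disjoint_left, Finset.mem_image]
    rintro t ⟨t1, _, rfl⟩ ⟨t2, _, heq⟩
    exact hxy ((List.cons_eq_cons.mp heq.symm).1)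

theorem pvOfListToFinset (c : List Char) : (PySem.Set.ofList c : List Char).toFinset = c.toFinset := by
  ext x
  simp only [List.mem_toFinset]
  exact PySem.Set.mem_ofList c x

theorem pvSumOfList (c : List Char) (g : Char → Int) :
    ((PySem.Set.ofList c).map g).sum = ∑ x ∈ c.toFinset, g x := by
  rw [← pvOfListToFinset, List.sum_toFinset g (PySem.Set.nodup_ofList c)]

theorem pvCountGo_eq_card (fuel : Nat) : ∀ (c v : List Char) (turn : Bool),
    c.length + v.length ≤ fuel →
    (∀ x ∈ c, pvIsVowel x = false) → (∀ x ∈ v, pvIsVowel x = true) →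
    pvCountGo fuel c v turn = ((pvGood c v turn).card : Int) := by
  induction fuel with
  | zero =>
    intro c v turn h hc hv
    have : c = [] ∧ v = [] := by
      constructor <;> [exact List.length_eq_zero_iff.mp (by omega); exact List.length_eq_zero_iff.mp (by omega)]
    obtain ⟨rfl, rfl⟩ := this
    simp [pvCountGo, pvGood, pvPat]
  | succ fuel' ih =>
    intro c v turn h hc hv
    rw [pvCountGo]
    by_cases hne : c = [] ∧ v = []
    · obtain ⟨rfl, rfl⟩ := hne
      simp [pvGood, pvPat]
    · rw [if_neg hne]
      cases turn
      · rw [if_neg (by simp)]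
        rw [pvGood_decomp_false c v hne hc hv, pvCard_biUnion_cons, pvSumOfList]
        rw [Nat.cast_sum]
        refine Finset.sum_congr rfl (fun x hx => ?_)
        have hxm : x ∈ v := List.mem_toFinset.mp hx
        have hle : c.length + (v.erase x).length ≤ fuel' := by
          have := List.length_erase_of_mem hxm
          have : 0 < v.length := List.length_pos_of_ne_nil (List.ne_nil_of_mem hxm)
          omega
        have hv' : ∀ y ∈ v.erase x, pvIsVowel y = true := fun y hy => hv y (List.mem_of_mem_erase hy)
        exact ih c (v.erase x) true hle hc hv'
      · rw [if_pos rfl]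
        rw [pvGood_decomp_true c v hne hc hv, pvCard_biUnion_cons, pvSumOfList]
        rw [Nat.cast_sum]
        refine Finset.sum_congr rfl (fun x hx => ?_)
        have hxm : x ∈ c := List.mem_toFinset.mp hx
        have hle : (c.erase x).length + v.length ≤ fuel' := by
          have := List.length_erase_of_mem hxm
          have : 0 < c.length := List.length_pos_of_ne_nil (List.ne_nil_of_mem hxm)
          omega
        have hc' : ∀ y ∈ c.erase x, pvIsVowel y = false := fun y hy => hc y (List.mem_of_mem_erase hy)
        exact ih (c.erase x) v false hle hc' hv

theorem pvPat_countP (t : List Char) : ∀ turn : Bool, pvPat turn t = true →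
    t.countP pvIsVowel = (if turn then t.length / 2 else (t.length + 1) / 2) := by
  induction t with
  | nil => intro turn _; cases turn <;> simp
  | cons x xs ih =>
    intro turn hpat
    cases turn
    · simp only [pvPat, Bool.and_eq_true] at hpat
      rw [List.countP_cons_of_pos (by simp [hpat.1])]
      have h2 := ih true hpat.2
      rw [if_pos rfl] at h2
      rw [if_neg (by simp : ¬ (false = true))]
      simp only [List.length_cons]
      omega
    · simp only [pvPat, Bool.and_eq_true, Bool.not_eq_true'] at hpat
      rw [List.countP_cons_of_neg (by simp [hpat.1])]
      have h2 := ih false hpat.2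
      rw [if_neg (by simp : ¬ (false = true))] at h2
      rw [if_pos rfl]
      simp only [List.length_cons]
      omega

theorem pvFoldCounts (s : List Char) : ∀ (a b : Int),
    s.foldl (fun (st : Int × Int) c =>
      if pvIsVowel c.toUpper then (st.1 + 1, st.2) else (st.1, st.2 + 1)) (a, b) =
    (a + (s.countP (fun c => pvIsVowel c.toUpper) : Int),
     b + (s.countP (fun c => !pvIsVowel c.toUpper) : Int)) := by
  induction s with
  | nil => intro a b; simp
  | cons x xs ih =>
    intro a b
    simp only [List.foldl_cons]
    by_cases hx : pvIsVowel x.toUpper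
    · rw [if_pos hx, ih, List.countP_cons_of_pos (by simpa using hx),
        List.countP_cons_of_neg (by simpa using hx)]
      rw [Prod.mk.injEq]
      constructor <;> push_cast <;> ring
    · rw [if_neg hx, ih, List.countP_cons_of_neg (by simpa using hx),
        List.countP_cons_of_pos (by simpa using hx)]
      rw [Prod.mk.injEq]
      constructor <;> push_cast <;> ring

theorem pvPossible_iff (s : List Char) :
    pvPossible s = true ↔ s.countP (fun c => pvIsVowel c.toUpper) = s.length / 2 := by
  unfold pvPossible
  rw [pvFoldCounts]
  have hlen : s.countP (fun c => pvIsVowel c.toUpper) + s.countP (fun c => !pvIsVowel c.toUpper) = s.length := by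
    rw [List.length_eq_countP_add_countP (fun c => pvIsVowel c.toUpper)]
    congr 1
    exact List.countP_congr (fun x _ => by simp)
  simp only [zero_add, Bool.or_eq_true, beq_iff_eq]
  constructor
  · rintro (h | h) <;> omega
  · intro h
    rcases Nat.even_or_odd s.length with he | ho
    · left; obtain ⟨k, hk⟩ := he; omega
    · right; obtain ⟨k, hk⟩ := ho; omega

theorem pvCountGo_nonneg (fuel : Nat) : ∀ (c v : List Char) (turn : Bool), 0 ≤ pvCountGo fuel c v turn := by
  induction fuel with
  | zero => intro c v turn; rw [pvCountGo]; split <;> simp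
  | succ fuel' ih =>
    intro c v turn
    rw [pvCountGo]
    split
    · exact zero_le_one
    · cases turn
      · rw [if_neg (by simp : ¬ (false = true))]
        exact List.sum_nonneg (fun x hx => by
          obtain ⟨y, _, rfl⟩ := List.mem_map.mp hx; exact ih ..)
      · rw [if_pos rfl]
        exact List.sum_nonneg (fun x hx => by
          obtain ⟨y, _, rfl⟩ := List.mem_map.mp hx; exact ih ..)

theorem pvCountGo_pos (fuel : Nat) : ∀ (c v : List Char) (turn : Bool),
    c.length + v.length ≤ fuel →
    (turn = true → c.length = v.length ∨ c.length = v.length + 1) →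
    (turn = false → v.length = c.length ∨ v.length = c.length + 1) →
    0 < pvCountGo fuel c v turn := by
  induction fuel with
  | zero =>
    intro c v turn h _ _
    have hc : c = [] := List.length_eq_zero_iff.mp (by omega)
    have hv : v = [] := List.length_eq_zero_iff.mp (by omega)
    subst hc; subst hv
    rw [pvCountGo]; simp
  | succ fuel' ih =>
    intro c v turn h ht hf
    rw [pvCountGo]
    by_cases hne : c = [] ∧ v = []
    · rw [if_pos hne]; exact zero_lt_one
    · rw [if_neg hne]
      cases turn
      · simp only [if_neg (by simp : ¬ (false = true))]
        have hvne : v ≠ [] := by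
          intro hv0; subst hv0
          refine hne ⟨List.length_eq_zero_iff.mp ?_, rfl⟩
          rcases hf rfl with h1 | h1 <;> simp_all
        obtain ⟨x, hx⟩ := List.exists_mem_of_ne_nil v hvne
        have hxs : x ∈ (PySem.Set.ofList v : List Char) := (PySem.Set.mem_ofList v x).mpr hx
        have hpos : 0 < pvCountGo fuel' c (v.erase x) true := by
          apply ih
          · have := List.length_erase_of_mem hx
            have : 0 < v.length := List.length_pos_of_ne_nil hvne
            omega
          · intro _
            have := List.length_erase_of_mem hx
            have : 0 < v.length := List.length_pos_of_ne_nil hvne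
            rcases hf rfl with h1 | h1 <;> omega
          · intro hcon; exact absurd hcon (by simp)
        calc (0 : Int) < pvCountGo fuel' c (v.erase x) true := hpos
          _ ≤ _ := List.single_le_sum (fun y hy => by
              obtain ⟨z, _, rfl⟩ := List.mem_map.mp hy; exact pvCountGo_nonneg ..) _
              (List.mem_map.mpr ⟨x, hxs, rfl⟩)
      · rw [if_pos rfl]
        have hcne : c ≠ [] := by
          intro hc0; subst hc0
          refine hne ⟨rfl, List.length_eq_zero_iff.mp ?_⟩
          rcases ht rfl with h1 | h1 <;> simp_all
        obtain ⟨x, hx⟩ := List.exists_mem_of_ne_nil c hcne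
        have hxs : x ∈ (PySem.Set.ofList c : List Char) := (PySem.Set.mem_ofList c x).mpr hx
        have hpos : 0 < pvCountGo fuel' (c.erase x) v false := by
          apply ih
          · have := List.length_erase_of_mem hx
            have : 0 < c.length := List.length_pos_of_ne_nil hcne
            omega
          · intro hcon; exact absurd hcon (by simp)
          · intro _
            have := List.length_erase_of_mem hx
            have : 0 < c.length := List.length_pos_of_ne_nil hcne
            rcases ht rfl with h1 | h1 <;> omega
        calc (0 : Int) < pvCountGo fuel' (c.erase x) v false := hpos
          _ ≤ _ := List.single_le_sum (fun y hy => by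
              obtain ⟨z, _, rfl⟩ := List.mem_map.mp hy; exact pvCountGo_nonneg ..) _
              (List.mem_map.mpr ⟨x, hxs, rfl⟩)

-- ===== assembly =====
theorem pvConsVows_perm (cs : List Char) :
    (cs.filter (fun c => !pvIsVowel c) ++ cs.filter (fun c => pvIsVowel c)).Perm cs := by
  have h := List.filter_append_perm (fun c => !pvIsVowel c) cs
  have : cs.filter (fun x => !!pvIsVowel x) = cs.filter (fun c => pvIsVowel c) :=
    List.filter_congr (fun x _ => by simp)
  rwa [this] at h

theorem pvGoodFinset_eq (S : String) (h2 : 2 ≤ S.toList.length) :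
    ((PySem.List.permutations S.toList S.toList.length).filter pvIsAnagram).toFinset =
      pvGood (S.toList.filter (fun c => !pvIsVowel c)) (S.toList.filter (fun c => pvIsVowel c)) true := by
  ext t
  rw [List.mem_toFinset, List.mem_filter, pvMem_good, pvMem_pypermutations]
  constructor
  · rintro ⟨hperm, hana⟩
    have htne : t ≠ [] := by
      intro h0; subst h0
      have hl := hperm.length_eq
      simp only [List.length_nil] at hl
      omega
    exact ⟨hperm.trans (pvConsVows_perm S.toList).symm, (pvIsAnagram_eq_pat t htne) ▸ hana⟩
  · rintro ⟨hperm, hpat⟩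
    have hperm' : t.Perm S.toList := hperm.trans (pvConsVows_perm S.toList)
    have htne : t ≠ [] := by
      intro h0; subst h0
      have hl := hperm'.length_eq
      simp only [List.length_nil] at hl
      omega
    exact ⟨hperm', (pvIsAnagram_eq_pat t htne) ▸ hpat⟩

theorem pvSolutionEq (S : String) (h2 : 2 ≤ S.toList.length) (hgate : pvPossible S.toList = true) :
    solution S = ((pvGood (S.toList.filter (fun c => !pvIsVowel c))
      (S.toList.filter (fun c => pvIsVowel c)) true).card : Int) := by
  unfold solution
  rw [if_neg (by intro h; rw [h] at h2; simp at h2), if_neg (by omega),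
    if_neg (by rw [hgate]; simp)]
  rw [pvFold_spec]
  have hupd : PySem.Set.update PySem.Set.empty
      ((PySem.List.permutations S.toList S.toList.length).filter pvIsAnagram) =
      PySem.Set.ofList ((PySem.List.permutations S.toList S.toList.length).filter pvIsAnagram) := by
    rw [PySem.Set.ofList_eq_foldl]; rfl
  rw [hupd]
  have hnodup := PySem.Set.nodup_ofList ((PySem.List.permutations S.toList S.toList.length).filter pvIsAnagram)
  have hcard : (PySem.Set.ofList ((PySem.List.permutations S.toList S.toList.length).filter pvIsAnagram) : List (List Char)).length
      = ((PySem.List.permutations S.toList S.toList.length).filter pvIsAnagram).toFinset.card := by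
    rw [← List.toFinset_card_of_nodup hnodup]
    congr 1
    ext x
    simp only [List.mem_toFinset]
    exact PySem.Set.mem_ofList _ x
  rw [show (PySem.Set.empty : PySem.Set (List Char)).length = 0 from rfl]
  rw [hcard, pvGoodFinset_eq S h2]
  push_cast
  ring

theorem pvNumVow_eq (cs : List Char) : pvNumVow cs = cs.countP pvIsVowel := by
  induction cs with
  | nil => rfl
  | cons x cs ih =>
    simp only [pvNumVow, List.count_cons, List.countP_cons] at *
    by_cases hx : pvIsVowel x = true
    · have hx5 : x = 'A' ∨ x = 'E' ∨ x = 'I' ∨ x = 'O' ∨ x = 'U' := by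
        simpa [pvIsVowel, pvVowels] using hx
      rw [if_pos hx]
      rcases hx5 with rfl | rfl | rfl | rfl | rfl <;> simp <;> omega
    · have hx5 : ¬(x = 'A') ∧ ¬(x = 'E') ∧ ¬(x = 'I') ∧ ¬(x = 'O') ∧ ¬(x = 'U') := by
        refine ⟨?_, ?_, ?_, ?_, ?_⟩ <;> (intro h; subst h; exact hx rfl)
      rw [if_neg hx]
      simp [beq_iff_eq, hx5.1, hx5.2.1, hx5.2.2.1, hx5.2.2.2.1, hx5.2.2.2.2]
      omega

theorem pvNumVow_upper_eq (cs : List Char) :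
    pvNumVow (cs.map Char.toUpper) = cs.countP (fun c => pvIsVowel c.toUpper) := by
  rw [pvNumVow_eq, List.countP_map]
  rfl

theorem pvLenCons (cs : List Char) :
    (cs.filter (fun c => !pvIsVowel c)).length + (cs.filter (fun c => pvIsVowel c)).length = cs.length := by
  have := (pvConsVows_perm cs).length_eq
  simpa using this

theorem pvLenVows (cs : List Char) :
    (cs.filter (fun c => pvIsVowel c)).length = cs.countP (fun c => pvIsVowel c) := by
  rw [List.countP_eq_length_filter]

theorem pvGood_empty_of_bad (cs : List Char) (hbad : cs.countP pvIsVowel ≠ cs.length / 2) :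
    pvGood (cs.filter (fun c => !pvIsVowel c)) (cs.filter (fun c => pvIsVowel c)) true = ∅ := by
  rw [Finset.eq_empty_iff_forall_notMem]
  intro t ht
  rw [pvMem_good] at ht
  obtain ⟨hperm, hpat⟩ := ht
  have h1 := pvPat_countP t true hpat
  rw [if_pos rfl] at h1
  have h2 : t.countP pvIsVowel = cs.countP pvIsVowel := by
    rw [hperm.countP_eq]
    rw [(pvConsVows_perm cs).countP_eq]
  have h3 : t.length = cs.length := by
    rw [hperm.length_eq]
    exact (pvConsVows_perm cs).length_eq
  rw [h2, h3] at h1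
  exact hbad h1

theorem pvAltVowSum (cs : List Char) :
    (pvVowels.map (fun ch => cs.count ch)).sum = cs.countP pvIsVowel := by
  have h := pvNumVow_eq cs
  simp only [pvNumVow] at h
  simp only [pvVowels, List.map_cons, List.map_nil, List.sum_cons, List.sum_nil]
  omega

theorem pvAltEq (S : String) (h2 : 2 ≤ S.toList.length) :
    solution_alt S = ((pvGood (S.toList.filter (fun c => !pvIsVowel c))
      (S.toList.filter (fun c => pvIsVowel c)) true).card : Int) := by
  unfold solution_alt
  rw [if_neg (by omega)]
  by_cases hnv : (pvVowels.map (fun ch => S.toList.count ch)).sum ≠ S.toList.length / 2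
  · rw [if_pos hnv]
    rw [pvAltVowSum] at hnv
    rw [pvGood_empty_of_bad _ hnv]
    simp
  · rw [if_neg hnv]
    unfold pvCount
    exact pvCountGo_eq_card _ _ _ true le_rfl
      (fun x hx => by simpa using List.of_mem_filter hx)
      (fun x hx => List.of_mem_filter hx)

theorem pvSolution_zero_of_short (S : String) (h : S.toList.length < 2) : solution S = 0 := by
  unfold solution
  by_cases hcs : S.toList = []
  · rw [if_pos hcs]
  · rw [if_neg hcs, if_pos (by have := List.length_pos_of_ne_nil hcs; omega)]

theorem pvSolution_zero_of_gate (S : String) (h2 : 2 ≤ S.toList.length)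
    (hgate : pvPossible S.toList ≠ true) : solution S = 0 := by
  unfold solution
  rw [if_neg (by intro h; rw [h] at h2; simp at h2), if_neg (by omega),
    if_pos (by rw [Bool.eq_false_iff.mpr hgate]; rfl)]

theorem solution_spec' : ∀ (S : String), ¬ D_solution S → solution S = solution_alt S := by
  intro S hnD
  by_cases hlen : 2 ≤ S.toList.length
  · by_cases hgate : pvPossible S.toList = true
    · rw [pvSolutionEq S hlen hgate, pvAltEq S hlen]
    · have hupper : S.toList.countP (fun c => pvIsVowel c.toUpper) ≠ S.toList.length / 2 :=
        fun h => hgate ((pvPossible_iff _).mpr h)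
      have hbad : S.toList.countP pvIsVowel ≠ S.toList.length / 2 := by
        intro hv
        exact hnD ⟨hlen, by rw [pvNumVow_eq]; exact hv, by rw [pvNumVow_upper_eq]; exact hupper⟩
      rw [pvSolution_zero_of_gate S hlen hgate, pvAltEq S hlen, pvGood_empty_of_bad _ hbad]
      simp
  · rw [pvSolution_zero_of_short S (by omega)]
    unfold solution_alt
    rw [if_pos (by omega)]

theorem solution_tight' : ∀ (S : String), D_solution S → solution S ≠ solution_alt S := by
  intro S hD
  obtain ⟨h2, hv, hu⟩ := hD
  rw [pvNumVow_eq] at hv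
  rw [pvNumVow_upper_eq] at hu
  have hgate : pvPossible S.toList ≠ true := fun h => hu ((pvPossible_iff _).mp h)
  rw [pvSolution_zero_of_gate S h2 hgate]
  have hpos : 0 < solution_alt S := by
    unfold solution_alt
    rw [if_neg (by omega), if_neg (by rw [pvAltVowSum]; omega)]
    unfold pvCount
    apply pvCountGo_pos _ _ _ true le_rfl
    · intro _
      have hL := pvLenCons S.toList
      have hV := pvLenVows S.toList
      rw [hv] at hV
      omega
    · intro hcon; exact absurd hcon (by simp)
  omega

-- ===== VERDICT (by name: the statement is the Claim_ definition above) =====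
theorem solution_spec : Claim_unchanged_solution := by
  intro S _
  unfold Spec_solution
  exact solution_spec' S

theorem solution_changed : Claim_changed_solution := by
  unfold Claim_changed_solution; decide

theorem solution_tight : Claim_exact_solution := by
  intro S _ hD
  exact solution_tight' S hD
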